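-- pv_equiv track=rewrite | github.com/rosteeslove/bsuir-4th-term-python-stuff | google_foobar/third_task/find-the-access-codes/solution.py | foo_one
-- ===== SOURCE A (Python) =====
-- def foo_one(some_list):
--     """
--     O(n^2) time complexity.
--     """
--     list_len = len(some_list)
--
--     indices = [[] for elem in some_list]
--     for i in range(list_len-1, 0, -1):
--         for j in range(0, i):
--             if some_list[i] % some_list[j] == 0:
--                 indices[i] += [j]
--
--     result = 0
--     for i in range(list_len-1, 1, -1):
--         for index in indices[i]:
--             result += len(indices[index])
--
--     return result
-- ===== SOURCE B (Python) =====
-- def foo_one(some_list):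
--     """
--     Single forward double loop with a divisor-count array: counts[j] is the
--     number of earlier divisors of some_list[j]; each qualifying pair (j, k)
--     contributes counts[j] triples ending at k with middle j.
--     """
--     n = len(some_list)
--     counts = [0] * n
--     result = 0
--     for k in range(n):
--         for j in range(k):
--             if some_list[k] % some_list[j] == 0:
--                 result += counts[j]
--                 counts[k] += 1
--     return result
-- ===== Notes on version B (the rewrite author's own statement) =====
-- stated objective: faster
-- what changed: Replaced A's two phases (materialise a divisor-index list for every position, then a second double loop summing lengths of those lists) by one forward double loop that keeps only an integer counts array of earlier-divisor counts and accumulates the answer on the fly.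
-- outside the precondition, e.g. on foo_one([0, 4, 8]): A raises ZeroDivisionError, B raises ZeroDivisionError
import Mathlib
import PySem

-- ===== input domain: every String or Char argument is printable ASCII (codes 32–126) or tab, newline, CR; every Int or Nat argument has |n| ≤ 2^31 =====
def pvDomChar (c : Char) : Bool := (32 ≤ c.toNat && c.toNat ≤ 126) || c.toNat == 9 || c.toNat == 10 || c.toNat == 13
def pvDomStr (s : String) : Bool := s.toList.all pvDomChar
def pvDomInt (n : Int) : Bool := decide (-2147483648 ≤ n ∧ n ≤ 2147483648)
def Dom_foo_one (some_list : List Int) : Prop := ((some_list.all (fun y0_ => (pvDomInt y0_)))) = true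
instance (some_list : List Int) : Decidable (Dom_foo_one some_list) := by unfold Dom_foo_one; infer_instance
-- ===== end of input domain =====

-- B keeps a running earlier-divisor count per position instead of A's materialised
-- per-position index lists, collapsing A's two phases into one forward double loop (measured constant-factor speedup).

-- ===== PORT A =====
-- 'if some_list[i] % some_list[j] == 0: indices[i] += [j]' for one inner-loop step
def fooRowStep (xs : List Int) (i : Nat) (acc : List (List Nat)) (j : Nat) : List (List Nat) :=
  if PySem.Int.mod (xs.getD i 0) (xs.getD j 0) == 0 then acc.set i (acc.getD i [] ++ [j]) else acc

-- 'for i in range(list_len-1, 0, -1): for j in range(0, i): …' (i counts down to 1)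
def fooRows (xs : List Int) : Nat → List (List Nat) → List (List Nat)
  | 0, acc => acc
  | i+1, acc => fooRows xs i ((List.range (i+1)).foldl (fooRowStep xs (i+1)) acc)

-- 'result += len(indices[index])'
def fooSumStep (indices : List (List Nat)) (r : Int) (idx : Nat) : Int :=
  r + ((indices.getD idx []).length : Int)

-- 'for i in range(list_len-1, 1, -1): for index in indices[i]: …' (i counts down to 2)
def fooResLoop (indices : List (List Nat)) : Nat → Int → Int
  | 0, r => r
  | 1, r => r
  | i+2, r => fooResLoop indices (i+1) ((indices.getD (i+2) []).foldl (fooSumStep indices) r)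

def foo_one (some_list : List Int) : Int :=
  let n := some_list.length
  let indices := fooRows some_list (n-1) (List.replicate n [])
  fooResLoop indices (n-1) 0

-- ===== PORT B =====
-- inner loop body: 'if some_list[k] % some_list[j] == 0: result += counts[j]; counts[k] += 1'
def fooAltInner (xs : List Int) (k : Nat) (st : List Int × Int) (j : Nat) : List Int × Int :=
  if PySem.Int.mod (xs.getD k 0) (xs.getD j 0) == 0 then
    (st.1.set k (st.1.getD k 0 + 1), st.2 + st.1.getD j 0)
  else st

def foo_one_alt (some_list : List Int) : Int :=
  let n := some_list.length
  let st := (List.range n).foldl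
    (fun st k => (List.range k).foldl (fooAltInner some_list k) st)
    (List.replicate n (0 : Int), (0 : Int))
  st.2

-- ===== PRECONDITION & SPEC =====
-- Pre_ excludes lists with a 0 anywhere but the last position: on those the Python
-- '% some_list[j]' raises ZeroDivisionError (in A and in B alike).
def Pre_foo_one (some_list : List Int) : Prop := ∀ x ∈ some_list.dropLast, x ≠ 0
instance (some_list : List Int) : Decidable (Pre_foo_one some_list) := by unfold Pre_foo_one; infer_instance
def pvWitness_foo_one : List Int := [2, 4, 8, 3]

def Spec_foo_one (some_list : List Int) (out : Int) : Prop := out = foo_one_alt some_list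
instance (some_list : List Int) (out : Int) : Decidable (Spec_foo_one some_list out) := by unfold Spec_foo_one; infer_instance

-- ===== CLAIM (what is proved, stated in full; the proofs are below) =====
def Claim_equal_foo_one : Prop := ∀ (some_list : List Int), Dom_foo_one some_list → Pre_foo_one some_list → Spec_foo_one some_list (foo_one some_list)

-- ===== LEMMAS AND PROOFS =====

-- small List.set/getD facts
theorem getD_set_self {α : Type} (l : List α) (i : Nat) (a d : α) (h : i < l.length) :
    (l.set i a).getD i d = a := by
  rw [List.getD, List.getElem?_set_self', List.getElem?_eq_getElem h]; rfl

theorem getD_set_ne {α : Type} (l : List α) (i j : Nat) (a d : α) (h : i ≠ j) :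
    (l.set i a).getD j d = l.getD j d := by
  rw [List.getD, List.getElem?_set_ne h, List.getD]

theorem set_getD_self {α : Type} (l : List α) (i : Nat) (d : α) (h : i < l.length) :
    l.set i (l.getD i d) = l := by
  rw [List.getD_eq_getElem _ _ h, List.set_getElem_self]

-- the list of earlier divisor positions of index i (A's final indices[i])
def fRow (xs : List Int) (i : Nat) : List Nat :=
  (List.range i).filter (fun j => PySem.Int.mod (xs.getD i 0) (xs.getD j 0) == 0)

-- contribution of the triples whose largest index is i
def fG (xs : List Int) (i : Nat) : Int :=
  ((fRow xs i).map (fun j => ((fRow xs j).length : Int))).sum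

theorem fRow_mem_lt {xs : List Int} {i j : Nat} (h : j ∈ fRow xs i) : j < i := by
  have := List.mem_filter.mp h
  simpa using List.mem_range.mp this.1

-- A's inner loop appends the qualifying j's to slot i
theorem rowFold (xs : List Int) (i : Nat) (L : List Nat) :
    ∀ acc : List (List Nat), i < acc.length →
      L.foldl (fooRowStep xs i) acc
        = acc.set i (acc.getD i []
            ++ L.filter (fun j => PySem.Int.mod (xs.getD i 0) (xs.getD j 0) == 0)) := by
  induction L with
  | nil =>
    intro acc h
    rw [List.foldl_nil, List.filter_nil, List.append_nil, set_getD_self _ _ _ h]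
  | cons j L ih =>
    intro acc h
    by_cases hc : (PySem.Int.mod (xs.getD i 0) (xs.getD j 0) == 0) = true
    · rw [List.foldl_cons]
      have hstep : fooRowStep xs i acc j = acc.set i (acc.getD i [] ++ [j]) := by
        unfold fooRowStep; rw [if_pos hc]
      rw [hstep, ih _ (by simpa using h)]
      rw [getD_set_self _ _ _ _ (by simpa using h), List.set_set]
      rw [List.filter_cons, if_pos hc, List.append_assoc, List.singleton_append]
    · rw [List.foldl_cons]
      have hstep : fooRowStep xs i acc j = acc := by unfold fooRowStep; rw [if_neg hc]
      rw [hstep, ih _ h]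
      rw [List.filter_cons, if_neg hc]

-- A's inner loop over range i builds exactly fRow i
theorem rowFoldRange (xs : List Int) (i : Nat) (acc : List (List Nat)) (h : i < acc.length) :
    (List.range i).foldl (fooRowStep xs i) acc = acc.set i (acc.getD i [] ++ fRow xs i) :=
  rowFold xs i (List.range i) acc h

-- A's outer build loop: slot t ends up holding fRow t for 1 ≤ t ≤ i
theorem fooRows_getD (xs : List Int) :
    ∀ (i : Nat) (acc : List (List Nat)), i < acc.length → ∀ t : Nat,
      (fooRows xs i acc).getD t []
        = if 1 ≤ t ∧ t ≤ i then acc.getD t [] ++ fRow xs t else acc.getD t [] := by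
  intro i
  induction i with
  | zero => intro acc _ t; rw [fooRows, if_neg (by omega)]
  | succ i ih =>
    intro acc h t
    rw [fooRows, rowFoldRange xs (i+1) acc h]
    have h' : i < (acc.set (i+1) (acc.getD (i+1) [] ++ fRow xs (i+1))).length := by
      simpa using Nat.lt_of_succ_lt h
    rw [ih _ h' t]
    by_cases ht : t = i + 1
    · subst ht
      rw [if_neg (by omega), if_pos (by omega), getD_set_self _ _ _ _ h]
    · rw [getD_set_ne _ _ _ _ _ (fun he => ht he.symm)]
      by_cases h1 : 1 ≤ t ∧ t ≤ i
      · rw [if_pos h1, if_pos ⟨h1.1, by omega⟩]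
      · rw [if_neg h1, if_neg (by omega)]

-- A's innermost result loop is a sum of lengths
theorem sumFold (indices : List (List Nat)) :
    ∀ (L : List Nat) (r : Int),
      L.foldl (fooSumStep indices) r
        = r + (L.map (fun idx => ((indices.getD idx []).length : Int))).sum := by
  intro L
  induction L with
  | nil => intro r; simp
  | cons j L ih => intro r; rw [List.foldl_cons]; rw [ih]; simp [fooSumStep]; ring

-- A's result loop sums fG over 2..i
theorem resLoop (xs : List Int) (indices : List (List Nat)) (m : Nat)
    (hI : ∀ t : Nat, t ≤ m → indices.getD t [] = fRow xs t) :
    ∀ i : Nat, i ≤ m → ∀ r : Int,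
      fooResLoop indices i r = r + ∑ t ∈ Finset.Icc 2 i, fG xs t := by
  intro i
  induction i using Nat.strong_induction_on with
  | _ i ihs =>
    match i, ihs with
    | 0, _ => intro _ r; simp [fooResLoop]
    | 1, _ => intro _ r; rw [fooResLoop, Finset.Icc_eq_empty (by omega : ¬(2:ℕ) ≤ 1)]; simp
    | i + 2, ihs =>
      intro hm r
      rw [fooResLoop, sumFold, hI (i+2) hm]
      have hmap : (fRow xs (i+2)).map (fun idx => ((indices.getD idx []).length : Int))
          = (fRow xs (i+2)).map (fun idx => ((fRow xs idx).length : Int)) := by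
        apply List.map_congr_left
        intro j hj
        rw [hI j (by have := fRow_mem_lt hj; omega)]
      rw [hmap]
      rw [ihs (i+1) (by omega) (by omega)]
      have : ∑ t ∈ Finset.Icc 2 (i+2), fG xs t
          = (∑ t ∈ Finset.Icc 2 (i+1), fG xs t) + fG xs (i+2) :=
        Finset.sum_Icc_succ_top (by omega) _
      rw [this]
      show r + fG xs (i+2) + _ = _
      ring

-- B's inner loop: counts[k] += (number of qualifying j), result += sum of counts[j]
theorem altInnerFold (xs : List Int) (k : Nat) :
    ∀ L : List Nat, (∀ j ∈ L, j < k) → ∀ (c : List Int) (r : Int), k < c.length →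
      L.foldl (fooAltInner xs k) (c, r)
        = (c.set k (c.getD k 0
              + ((L.filter (fun j => PySem.Int.mod (xs.getD k 0) (xs.getD j 0) == 0)).length : Int)),
           r + ((L.filter (fun j => PySem.Int.mod (xs.getD k 0) (xs.getD j 0) == 0)).map
                  (fun j => c.getD j 0)).sum) := by
  intro L
  induction L with
  | nil =>
    intro _ c r hk
    rw [List.foldl_nil, List.filter_nil]
    simp only [List.length_nil, List.map_nil, List.sum_nil, Nat.cast_zero, add_zero]
    rw [set_getD_self _ _ _ hk]
  | cons j L ih =>
    intro hL c r hk
    by_cases hc : (PySem.Int.mod (xs.getD k 0) (xs.getD j 0) == 0) = true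
    · rw [List.foldl_cons]
      have hstep : fooAltInner xs k (c, r) j
          = (c.set k (c.getD k 0 + 1), r + c.getD j 0) := by
        unfold fooAltInner; rw [if_pos hc]
      rw [hstep, ih (fun j' hj' => hL j' (List.mem_cons_of_mem _ hj'))
            _ _ (by simpa using hk)]
      have hkk : (c.set k (c.getD k 0 + 1)).getD k 0 = c.getD k 0 + 1 :=
        getD_set_self _ _ _ _ hk
      have hmap : (L.filter (fun j => PySem.Int.mod (xs.getD k 0) (xs.getD j 0) == 0)).map
              (fun j' => (c.set k (c.getD k 0 + 1)).getD j' 0)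
          = (L.filter (fun j => PySem.Int.mod (xs.getD k 0) (xs.getD j 0) == 0)).map
              (fun j' => c.getD j' 0) := by
        apply List.map_congr_left
        intro j' hj'
        have : j' < k := hL j' (List.mem_cons_of_mem _ (List.mem_filter.mp hj').1)
        exact getD_set_ne _ _ _ _ _ (by omega)
      rw [hkk, hmap, List.set_set]
      rw [List.filter_cons, if_pos hc]
      simp only [List.map_cons, List.sum_cons, List.length_cons]
      rw [Prod.mk.injEq]
      constructor
      · have : c.getD k 0 + 1
              + (((L.filter (fun j => PySem.Int.mod (xs.getD k 0) (xs.getD j 0) == 0)).length : Int))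
            = c.getD k 0
              + (((L.filter (fun j => PySem.Int.mod (xs.getD k 0) (xs.getD j 0) == 0)).length + 1 : Nat) : Int) := by
          push_cast; ring
        rw [this]
      · ring
    · rw [List.foldl_cons]
      have hstep : fooAltInner xs k (c, r) j = (c, r) := by
        unfold fooAltInner; rw [if_neg hc]
      rw [hstep, ih (fun j' hj' => hL j' (List.mem_cons_of_mem _ hj')) _ _ hk]
      rw [List.filter_cons, if_neg hc]

-- getD of a mapped range
theorem getD_map_range' {α : Type} (f : Nat → α) (n t : Nat) (d : α) :
    (((List.range n).map f).getD t d) = if t < n then f t else d := by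
  by_cases h : t < n
  · rw [if_pos h, List.getD, List.getElem?_map, List.getElem?_range h]; rfl
  · rw [if_neg h, List.getD, List.getElem?_eq_none (by simpa using h)]; rfl

-- B's outer loop invariant after K iterations
theorem altOuter (xs : List Int) :
    ∀ K : Nat, K ≤ xs.length →
      (List.range K).foldl
          (fun st k => (List.range k).foldl (fooAltInner xs k) st)
          (List.replicate xs.length (0 : Int), (0 : Int))
        = ((List.range xs.length).map
             (fun t => if t < K then ((fRow xs t).length : Int) else 0),
           ∑ t ∈ Finset.range K, fG xs t) := by
  intro K
  induction K with
  | zero =>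
    intro _
    simp only [List.range_zero, List.foldl_nil, Finset.range_zero, Finset.sum_empty]
    rw [Prod.mk.injEq]
    refine ⟨?_, rfl⟩
    symm
    rw [List.eq_replicate_iff]
    constructor
    · simp
    · intro b hb
      obtain ⟨t, _, ht⟩ := List.mem_map.mp hb
      simpa using ht.symm
  | succ K ih =>
    intro hK
    rw [List.range_succ, List.foldl_append, ih (by omega), List.foldl_cons, List.foldl_nil]
    have hlen : K < ((List.range xs.length).map
        (fun t => if t < K then ((fRow xs t).length : Int) else 0)).length := by
      simpa using hK
    rw [altInnerFold xs K _ (fun j hj => List.mem_range.mp hj) _ _ hlen]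
    have hKval : ((List.range xs.length).map
        (fun t => if t < K then ((fRow xs t).length : Int) else 0)).getD K 0 = 0 := by
      rw [getD_map_range', if_pos (by omega : K < xs.length), if_neg (lt_irrefl K)]
    rw [hKval]
    have hfil : (List.range K).filter
        (fun j => PySem.Int.mod (xs.getD K 0) (xs.getD j 0) == 0) = fRow xs K := rfl
    rw [hfil, Prod.mk.injEq]
    constructor
    · -- counts list becomes the K+1 version
      apply List.ext_getElem (by simp)
      intro t h1 h2
      have htn : t < xs.length := by simpa using h2
      by_cases ht : t = K
      · subst ht
        rw [List.getElem_set_self]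
        simp only [List.getElem_map, List.getElem_range]
        rw [if_pos (by omega), zero_add]
      · rw [List.getElem_set_ne (fun he => ht he.symm)]
        simp only [List.getElem_map, List.getElem_range]
        by_cases h3 : t < K
        · rw [if_pos h3, if_pos (by omega)]
        · rw [if_neg h3, if_neg (by omega)]
    · -- result accumulates fG K
      rw [Finset.sum_range_succ]
      congr 1
      show ((fRow xs K).map _).sum = fG xs K
      unfold fG
      apply congrArg
      apply List.map_congr_left
      intro j hj
      have hjK : j < K := fRow_mem_lt hj
      rw [getD_map_range', if_pos (by omega), if_pos hjK]

theorem fG_zero (xs : List Int) : fG xs 0 = 0 := by simp [fG, fRow]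

theorem fG_one (xs : List Int) : fG xs 1 = 0 := by
  apply List.sum_eq_zero
  intro x hx
  obtain ⟨j, hj, hx⟩ := List.mem_map.mp hx
  have : j < 1 := fRow_mem_lt hj
  interval_cases j
  · rw [← hx]; simp [fRow]

-- sum over 0..m equals sum over 2..m (the first two terms vanish)
theorem sumBridge (xs : List Int) :
    ∀ m : Nat, (∑ t ∈ Finset.range (m+1), fG xs t) = ∑ t ∈ Finset.Icc 2 m, fG xs t := by
  intro m
  induction m with
  | zero => simp [fG_zero]
  | succ m ih =>
    rw [Finset.sum_range_succ, ih]
    match m with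
    | 0 =>
      rw [Finset.Icc_eq_empty (by omega : ¬ (2:ℕ) ≤ 0),
          Finset.Icc_eq_empty (by omega : ¬ (2:ℕ) ≤ 1)]
      simp [fG_one]
    | k + 1 =>
      rw [Finset.sum_Icc_succ_top (by omega : 2 ≤ k + 2)]

-- ===== VERDICT (by name: the statement is the Claim_ definition above) =====
theorem foo_one_spec : Claim_equal_foo_one := by
  intro xs _ _
  unfold Spec_foo_one
  match xs with
  | [] => rfl
  | y :: ys =>
    have hrep : ∀ t : Nat, (List.replicate (ys.length + 1) ([] : List Nat)).getD t [] = [] := by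
      intro t
      rw [List.getD, List.getElem?_replicate]
      split <;> rfl
    have hIdx : ∀ t : Nat, t ≤ ys.length →
        (fooRows (y :: ys) ys.length (List.replicate (ys.length + 1) [])).getD t []
          = fRow (y :: ys) t := by
      intro t ht
      rw [fooRows_getD (y :: ys) ys.length _ (by simp) t]
      by_cases h1 : 1 ≤ t ∧ t ≤ ys.length
      · rw [if_pos h1, hrep, List.nil_append]
      · rw [if_neg h1, hrep]
        have ht0 : t = 0 := by omega
        subst ht0
        rfl
    have hA : foo_one (y :: ys)
        = 0 + ∑ t ∈ Finset.Icc 2 ys.length, fG (y :: ys) t := by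
      show fooResLoop (fooRows (y :: ys) ys.length (List.replicate (ys.length + 1) []))
          ys.length 0 = _
      exact resLoop (y :: ys) _ ys.length hIdx ys.length (le_refl _) 0
    have hB : foo_one_alt (y :: ys)
        = ∑ t ∈ Finset.range (ys.length + 1), fG (y :: ys) t := by
      show (List.foldl (fun st k => (List.range k).foldl (fooAltInner (y :: ys) k) st)
          (List.replicate (ys.length + 1) 0, 0) (List.range (ys.length + 1))).2 = _
      have := altOuter (y :: ys) (ys.length + 1) (by simp)
      exact congrArg Prod.snd this
    rw [hA, hB, zero_add, sumBridge]
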